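-- pv_equiv track=rewrite | github.com/wnstj-yang/Algorithm | Programmers/programmers_[3차] 방금그곡.py | solution
-- ===== SOURCE A (Python) =====
-- def solution(m, musicinfos):
--     answer = []
--     max_time = 0
--     idx = 0
--     # 각 음에 따른 치환
--     sounds = {'C#': '1', 'D#': '2', 'F#': '3', 'G#': '4', 'A#': '5'}
--     for key,val in sounds.items():
--         m = m.replace(key, val)
--
--     for info in musicinfos:
--         info = info.split(',')
--         # 1. 분 단위로 시간을 구한다
--         hour = (int(info[1][:2]) - int(info[0][:2])) * 60
--         minute = (int(info[1][3:]) - int(info[0][3:]))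
--         time = hour + minute # 총 재생 시간
--         # 2. 악보 정보 또한 치환시킨다.
--         for key,val in sounds.items():
--             info[3] = info[3].replace(key, val)
--         # 3. 재생 시간 만큼의 연속되는 문자열을 저장
--         lyrics = ''
--         length = len(info[3])
--         if time // length != 0:
--             lyrics += info[3] * (time // length)
--         end = time % length
--         lyrics += info[3][:end]
--         # 4. 재생 시간이 긴 것과 인덱스, 음악 제목을 넣어서 추후 정답에 활용
--         if m in lyrics:
--             answer.append((time, idx, info[2]))
--         idx += 1
--
--     # 5. 재생 시간 긴 것 - 내림 차순, 인덱스 - 오름 차순으로 정렬해서 정답 찾는다.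
--     if len(answer) == 0:
--         return "(None)"
--     else:
--         answer.sort(key=lambda x:(-x[0], x[1]))
--         return answer[0][2]
-- ===== SOURCE B (Python) =====
-- def solution(m, musicinfos):
--     sounds = (('C#', '1'), ('D#', '2'), ('F#', '3'), ('G#', '4'), ('A#', '5'))
--     for key, val in sounds:
--         m = m.replace(key, val)
--     best = None  # (time, title) of the longest-playing match seen so far; ties keep the earliest
--     for info in musicinfos:
--         parts = info.split(',')
--         time = (int(parts[1][:2]) - int(parts[0][:2])) * 60 + int(parts[1][3:]) - int(parts[0][3:])
--         melody = parts[3]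
--         for key, val in sounds:
--             melody = melody.replace(key, val)
--         lyrics = melody * (time // len(melody)) + melody[:time % len(melody)]
--         if m in lyrics and (best is None or time > best[0]):
--             best = (time, parts[2])
--     return "(None)" if best is None else best[1]
-- ===== Notes on version B (the rewrite author's own statement) =====
-- stated objective: simpler
-- what changed: B drops A's answer list and final sort by (-time, idx): it keeps a single running best (time, title), updating only on strictly longer playtime so the earliest index wins ties, and returns it (or "(None)") directly.
import Mathlib
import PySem

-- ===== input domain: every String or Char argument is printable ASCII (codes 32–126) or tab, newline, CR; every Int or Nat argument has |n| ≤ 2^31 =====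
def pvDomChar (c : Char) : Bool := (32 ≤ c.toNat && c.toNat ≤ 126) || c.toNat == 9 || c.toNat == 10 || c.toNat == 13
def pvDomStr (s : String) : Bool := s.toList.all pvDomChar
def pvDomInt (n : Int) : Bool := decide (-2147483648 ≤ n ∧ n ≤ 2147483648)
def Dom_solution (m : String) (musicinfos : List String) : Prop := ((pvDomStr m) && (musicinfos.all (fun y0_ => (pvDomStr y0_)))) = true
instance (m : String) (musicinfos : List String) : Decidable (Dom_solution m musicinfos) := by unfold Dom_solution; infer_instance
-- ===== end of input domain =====

-- B replaces A's "collect (time, idx, title), sort by (-time, idx), take first" with a single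
-- running-best accumulator (strictly-greater update keeps the earliest among equal playtimes);
-- the per-music matching computation is the same in both sources. Objective: simpler.

-- ===== PORT A =====
-- shared helper (identical lines in Source A and Source B): the five sharp substitutions
def pvSubst (s : List Char) : List Char :=
  PySem.Chars.replace (PySem.Chars.replace (PySem.Chars.replace (PySem.Chars.replace
    (PySem.Chars.replace s ['C','#'] ['1']) ['D','#'] ['2']) ['F','#'] ['3']) ['G','#'] ['4']) ['A','#'] ['5']

-- shared helper (identical lines in Source A and Source B): split one info string, read the two clock
-- fields, the title and the substituted melody; none exactly where the Python raises
-- (missing fields: IndexError, unparsable int: ValueError, empty melody: ZeroDivisionError)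
def pvParse (info : String) : Option (Int × String × List Char) :=
  let parts := (PySem.Str.split? info ",").getD []
  match PySem.List.pyGet? parts 0, PySem.List.pyGet? parts 1,
        PySem.List.pyGet? parts 2, PySem.List.pyGet? parts 3 with
  | some p0, some p1, some p2, some p3 =>
    match PySem.Int.ofStr? (PySem.Str.slice p1 none (some 2)), PySem.Int.ofStr? (PySem.Str.slice p0 none (some 2)),
          PySem.Int.ofStr? (PySem.Str.slice p1 (some 3) none), PySem.Int.ofStr? (PySem.Str.slice p0 (some 3) none) with
    | some h1, some h0, some mi1, some mi0 =>
      let mel := pvSubst p3.toList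
      if mel.length = 0 then none
      else some ((h1 - h0) * 60 + (mi1 - mi0), p2, mel)
    | _, _, _, _ => none
  | _, _, _, _ => none

-- A's loop body: append (time, idx, title) to answer when m occurs in the repeated lyrics
def stepA (msub : List Char) (st : List (Int × Int × String) × Int) (info : String) :
    List (Int × Int × String) × Int :=
  match pvParse info with
  | none => st
  | some (time, title, mel) =>
    let q := PySem.Int.floordiv time (mel.length : Int)
    let lyrics := (if q ≠ 0 then PySem.List.pyRepeat mel q else []) ++
      PySem.List.slice mel none (some (PySem.Int.mod time (mel.length : Int)))
    (if PySem.Chars.isIn msub lyrics then st.1 ++ [(time, st.2, title)] else st.1, st.2 + 1)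

def solution (m : String) (musicinfos : List String) : String :=
  let msub := pvSubst m.toList
  let answer := (musicinfos.foldl (stepA msub) ([], 0)).1
  if answer.length = 0 then "(None)"
  else
    match PySem.List.sorted2 answer (fun x => -x.1) (fun x => x.2.1) with
    | [] => "(None)"  -- unreachable: the sorted list is a permutation of a non-empty list
    | x :: _ => x.2.2

-- ===== PORT B =====
-- B's loop body: keep the running best (time, title), updating only on strictly longer time
def stepB (msub : List Char) (best : Option (Int × String)) (info : String) : Option (Int × String) :=
  match pvParse info with
  | none => best
  | some (time, title, mel) =>
    let lyrics := PySem.List.pyRepeat mel (PySem.Int.floordiv time (mel.length : Int)) ++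
      PySem.List.slice mel none (some (PySem.Int.mod time (mel.length : Int)))
    if PySem.Chars.isIn msub lyrics &&
        (match best with | none => true | some b => decide (b.1 < time)) then
      some (time, title)
    else best

def solution_alt (m : String) (musicinfos : List String) : String :=
  let msub := pvSubst m.toList
  match musicinfos.foldl (stepB msub) none with
  | none => "(None)"
  | some b => b.2

-- ===== PRECONDITION & SPEC =====
-- Pre_ excludes exactly the inputs where the Python A raises: an info entry whose comma-split
-- has fewer than 4 fields (IndexError), whose clock slices do not parse as int (ValueError),
-- or whose melody field is empty (ZeroDivisionError).
def Pre_solution (m : String) (musicinfos : List String) : Prop :=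
  ∀ info ∈ musicinfos,
    let parts := (PySem.Str.split? info ",").getD []
    4 ≤ parts.length ∧
    (PySem.Int.ofStr? (PySem.Str.slice (PySem.List.pyGetD parts 0 "") none (some 2))).isSome = true ∧
    (PySem.Int.ofStr? (PySem.Str.slice (PySem.List.pyGetD parts 1 "") none (some 2))).isSome = true ∧
    (PySem.Int.ofStr? (PySem.Str.slice (PySem.List.pyGetD parts 0 "") (some 3) none)).isSome = true ∧
    (PySem.Int.ofStr? (PySem.Str.slice (PySem.List.pyGetD parts 1 "") (some 3) none)).isSome = true ∧
    PySem.List.pyGetD parts 3 "" ≠ ""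
instance (m : String) (musicinfos : List String) : Decidable (Pre_solution m musicinfos) := by
  unfold Pre_solution; infer_instance

def pvWitness_solution : String × List String := ("ABC", ["12:00,12:03,WORLD,ABCDEF", "12:00,12:06,HELLO,ABC"])

def Spec_solution (m : String) (musicinfos : List String) (out : String) : Prop := out = solution_alt m musicinfos
instance (m : String) (musicinfos : List String) (out : String) : Decidable (Spec_solution m musicinfos out) := by unfold Spec_solution; infer_instance

-- ===== CLAIM (what is proved, stated in full; the proofs are below) =====
def Claim_equal_solution : Prop := ∀ (m : String) (musicinfos : List String), Dom_solution m musicinfos → Pre_solution m musicinfos → Spec_solution m musicinfos (solution m musicinfos)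

-- ===== LEMMAS AND PROOFS =====

-- the first-maximal-time accumulator over full (time, idx, title) triples
def pvUpd (acc : Option (Int × Int × String)) (x : Int × Int × String) : Option (Int × Int × String) :=
  match acc with
  | none => some x
  | some b => if b.1 < x.1 then some x else some b

def pvProj (b : Int × Int × String) : Int × String := (b.1, b.2.2)

def pvKey (x : Int × Int × String) : Lex (Int × Int) := toLex (-x.1, x.2.1)

lemma pvKey_lt_of_time {x y : Int × Int × String} (h : y.1 < x.1) : pvKey x < pvKey y := by
  simp [pvKey, Prod.Lex.lt_iff]; omega

lemma pvKey_lt_of_idx {x y : Int × Int × String} (h1 : x.1 = y.1) (h2 : x.2.1 < y.2.1) :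
    pvKey x < pvKey y := by
  simp [pvKey, Prod.Lex.lt_iff]; omega

lemma pvKey_inj {x y : Int × Int × String} (h : pvKey x = pvKey y) : x.1 = y.1 ∧ x.2.1 = y.2.1 := by
  have := congrArg (fun z => ofLex z) h
  simp [pvKey] at this
  omega

-- the comparator sorted2 uses for the keys (-time, idx) is the strict lexicographic order
lemma pv_sorted2_eq (l : List (Int × Int × String)) :
    PySem.List.sorted2 l (fun x => -x.1) (fun x => x.2.1) =
      l.foldl (fun acc x => PySem.List.insertBy (fun a b => decide (pvKey a < pvKey b)) x acc) [] := by
  have hb : (fun (a b : Int × Int × String) =>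
      (decide (-a.1 < -b.1) || (!decide (-b.1 < -a.1) && decide (a.2.1 < b.2.1))))
      = (fun a b => decide (pvKey a < pvKey b)) := by
    funext a b
    by_cases h1 : -a.1 < -b.1 <;> by_cases h2 : -b.1 < -a.1 <;> by_cases h3 : a.2.1 < b.2.1 <;>
      simp [pvKey, Prod.Lex.lt_iff, h1, h2, h3] <;> omega
  simp only [PySem.List.sorted2, if_neg (by decide : ¬ (false = true))]
  rw [hb]

lemma pv_pairwise_foldl_insertBy {α κ : Type} [LinearOrder κ] (key : α → κ)
    (l : List α) (acc : List α) (h : acc.Pairwise (fun a b => key a ≤ key b)) :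
    (l.foldl (fun acc x => PySem.List.insertBy (fun a b => decide (key a < key b)) x acc) acc).Pairwise
      (fun a b => key a ≤ key b) := by
  induction l generalizing acc with
  | nil => exact h
  | cons x t ih => exact ih _ (PySem.List.insertBy_pairwise_le key x acc h)

-- the running-best fold returns the key-minimal element (earliest among maximal times)
lemma pvUpd_min (l : List (Int × Int × String)) : ∀ (b : Int × Int × String),
    (b :: l).Pairwise (fun a c => a.2.1 < c.2.1) →
    ∃ c, l.foldl pvUpd (some b) = some c ∧ c ∈ b :: l ∧ ∀ y ∈ b :: l, pvKey c ≤ pvKey y := by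
  induction l with
  | nil => intro b _; exact ⟨b, rfl, List.mem_singleton_self b, by intro y hy; simp at hy; simp [hy]⟩
  | cons x t ih =>
    intro b hp
    have hb1 : b.2.1 < x.2.1 := (List.pairwise_cons.1 hp).1 x (List.mem_cons_self)
    have hxt : (x :: t).Pairwise (fun a c => a.2.1 < c.2.1) := (List.pairwise_cons.1 hp).2
    simp only [List.foldl_cons]
    by_cases h : b.1 < x.1
    · have : pvUpd (some b) x = some x := by simp [pvUpd, h]
      rw [this]
      obtain ⟨c, hc1, hc2, hc3⟩ := ih x hxt
      refine ⟨c, hc1, List.mem_cons_of_mem _ hc2, ?_⟩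
      intro y hy
      rcases List.mem_cons.1 hy with rfl | hy'
      · exact le_trans (hc3 x List.mem_cons_self) (le_of_lt (pvKey_lt_of_time h))
      · exact hc3 y hy'
    · have : pvUpd (some b) x = some b := by simp [pvUpd, h]
      rw [this]
      have hbt : (b :: t).Pairwise (fun a c => a.2.1 < c.2.1) := by
        refine List.pairwise_cons.2 ⟨fun y hy => (List.pairwise_cons.1 hp).1 y (List.mem_cons_of_mem _ hy), (List.pairwise_cons.1 hxt).2⟩
      obtain ⟨c, hc1, hc2, hc3⟩ := ih b hbt
      have hbx : pvKey b < pvKey x := by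
        rcases lt_or_eq_of_le (not_lt.1 h) with h' | h'
        · exact pvKey_lt_of_time h'
        · exact pvKey_lt_of_idx h'.symm hb1
      refine ⟨c, hc1, ?_, ?_⟩
      · rcases List.mem_cons.1 hc2 with rfl | hc' 
        · exact List.mem_cons_self
        · exact List.mem_cons_of_mem _ (List.mem_cons_of_mem _ hc')
      · intro y hy
        rcases List.mem_cons.1 hy with rfl | hy'
        · exact hc3 y List.mem_cons_self
        · rcases List.mem_cons.1 hy' with rfl | hy''
          · exact le_trans (hc3 b List.mem_cons_self) (le_of_lt hbx)
          · exact hc3 y (List.mem_cons_of_mem _ hy'')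

lemma pv_lyrics_eq (mel : List Char) (time : Int) :
    ((if PySem.Int.floordiv time (mel.length : Int) ≠ 0 then
        PySem.List.pyRepeat mel (PySem.Int.floordiv time (mel.length : Int)) else []) : List Char)
      = PySem.List.pyRepeat mel (PySem.Int.floordiv time (mel.length : Int)) := by
  split_ifs with h
  · rfl
  · rw [not_ne_iff.1 h]; simp [PySem.List.pyRepeat]

-- B's fold over the infos tracks the projection of the pvUpd-fold over A's answer list
lemma pv_loop_rel (msub : List Char) (infos : List String) : ∀ (acc : List (Int × Int × String)) (idx : Int),
    infos.foldl (stepB msub) ((acc.foldl pvUpd none).map pvProj)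
      = (((infos.foldl (stepA msub) (acc, idx)).1).foldl pvUpd none).map pvProj := by
  induction infos with
  | nil => intro acc idx; rfl
  | cons info t ih =>
    intro acc idx
    simp only [List.foldl_cons]
    rcases hp : pvParse info with - | ⟨time, title, mel⟩
    · have hA : stepA msub (acc, idx) info = (acc, idx) := by simp [stepA, hp]
      have hB : ∀ b, stepB msub b info = b := by intro b; simp [stepB, hp]
      rw [hA, hB, ih acc idx]
    · have hA : stepA msub (acc, idx) info =
          (if PySem.Chars.isIn msub (PySem.List.pyRepeat mel (PySem.Int.floordiv time (mel.length : Int)) ++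
              PySem.List.slice mel none (some (PySem.Int.mod time (mel.length : Int)))) then
            acc ++ [(time, idx, title)] else acc, idx + 1) := by
        simp only [stepA, hp]
        rw [pv_lyrics_eq]
      have hB : stepB msub ((acc.foldl pvUpd none).map pvProj) info =
          (if PySem.Chars.isIn msub (PySem.List.pyRepeat mel (PySem.Int.floordiv time (mel.length : Int)) ++
              PySem.List.slice mel none (some (PySem.Int.mod time (mel.length : Int)))) &&
              (match (acc.foldl pvUpd none).map pvProj with
               | none => true | some b => decide (b.1 < time)) then
            some (time, title)
          else (acc.foldl pvUpd none).map pvProj) := by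
        simp only [stepB, hp]
      rw [hA, hB]
      by_cases hin : PySem.Chars.isIn msub (PySem.List.pyRepeat mel (PySem.Int.floordiv time (mel.length : Int)) ++
          PySem.List.slice mel none (some (PySem.Int.mod time (mel.length : Int))))
      · have hfold : ((acc ++ [(time, idx, title)]).foldl pvUpd none) =
            pvUpd (acc.foldl pvUpd none) (time, idx, title) := by simp
        simp only [hin, if_pos, Bool.true_and]
        rcases hacc : acc.foldl pvUpd none with - | b
        · simp only [Option.map_none]
          have := ih (acc ++ [(time, idx, title)]) (idx + 1)
          rw [hfold, hacc] at this
          simpa [pvUpd, pvProj] using this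
        · simp only [Option.map_some]
          by_cases hbt : b.1 < time
          · rw [if_pos (by simpa [pvProj] using hbt)]
            have := ih (acc ++ [(time, idx, title)]) (idx + 1)
            rw [hfold, hacc] at this
            simpa [pvUpd, hbt, pvProj] using this
          · rw [if_neg (by simpa [pvProj] using hbt)]
            have := ih (acc ++ [(time, idx, title)]) (idx + 1)
            rw [hfold, hacc] at this
            simpa [pvUpd, hbt, pvProj] using this
      · rw [if_neg (by simp [hin]), if_neg hin]
        exact ih acc (idx + 1)

-- A's answer list carries strictly increasing indices
lemma pv_answer_pairwise (msub : List Char) (infos : List String) :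
    ∀ (acc : List (Int × Int × String)) (idx : Int),
    acc.Pairwise (fun a c => a.2.1 < c.2.1) → (∀ y ∈ acc, y.2.1 < idx) →
    (infos.foldl (stepA msub) (acc, idx)).1.Pairwise (fun a c => a.2.1 < c.2.1) := by
  induction infos with
  | nil => intro acc idx h1 _; exact h1
  | cons info t ih =>
    intro acc idx h1 h2
    simp only [List.foldl_cons]
    rcases hp : pvParse info with - | ⟨time, title, mel⟩
    · rw [(by simp [stepA, hp] : stepA msub (acc, idx) info = (acc, idx))]
      exact ih acc idx h1 h2
    · simp only [stepA, hp]
      by_cases hin : PySem.Chars.isIn msub ((if PySem.Int.floordiv time (mel.length : Int) ≠ 0 then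
            PySem.List.pyRepeat mel (PySem.Int.floordiv time (mel.length : Int)) else []) ++
          PySem.List.slice mel none (some (PySem.Int.mod time (mel.length : Int))))
      · simp only [hin, if_pos]
        refine ih _ (idx + 1) ?_ ?_
        · refine List.pairwise_append.2 ⟨h1, List.pairwise_singleton _ _, ?_⟩
          intro y hy z hz
          simp at hz
          subst hz
          exact h2 y hy
        · intro y hy
          rcases List.mem_append.1 hy with hy' | hy'
          · have := h2 y hy'; omega
          · simp at hy'; subst hy'; simp
      · simp only [hin]
        refine ih _ (idx + 1) h1 ?_
        intro y hy; have := h2 y hy; omega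

lemma pv_min_unique (l : List (Int × Int × String)) (hp : l.Pairwise (fun a c => a.2.1 < c.2.1))
    {h c : Int × Int × String} (hh : h ∈ l) (hc : c ∈ l)
    (hmh : ∀ y ∈ l, pvKey h ≤ pvKey y) (hmc : ∀ y ∈ l, pvKey c ≤ pvKey y) : h = c := by
  have hk : pvKey h = pvKey c := le_antisymm (hmh c hc) (hmc h hh)
  by_contra hne
  have hpd : l.Pairwise (fun a c : Int × Int × String => a.2.1 ≠ c.2.1) :=
    hp.imp (fun h => ne_of_lt h)
  have hsym : Symmetric (fun a c : Int × Int × String => a.2.1 ≠ c.2.1) := fun a b hab => hab.symm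
  exact (hpd.forall hsym hh hc hne) (pvKey_inj hk).2

-- ===== VERDICT (by name: the statement is the Claim_ definition above) =====
theorem solution_spec : Claim_equal_solution := by
  intro m infos _ _
  unfold Spec_solution
  have hrel := pv_loop_rel (pvSubst m.toList) infos [] 0
  simp only [List.foldl_nil, Option.map_none] at hrel
  have hsolA : solution m infos =
      (if ((infos.foldl (stepA (pvSubst m.toList)) ([], 0)).1).length = 0 then "(None)"
       else match PySem.List.sorted2 (infos.foldl (stepA (pvSubst m.toList)) ([], 0)).1
              (fun x => -x.1) (fun x => x.2.1) with
            | [] => "(None)"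
            | x :: _ => x.2.2) := rfl
  have hsolB : solution_alt m infos =
      (match infos.foldl (stepB (pvSubst m.toList)) none with
       | none => "(None)"
       | some b => b.2) := rfl
  rw [hsolA, hsolB, hrel]
  rcases hA : (infos.foldl (stepA (pvSubst m.toList)) ([], 0)).1 with - | ⟨a, t⟩
  · simp
  · have hpw := pv_answer_pairwise (pvSubst m.toList) infos [] 0 (List.Pairwise.nil) (by simp)
    rw [hA] at hpw
    obtain ⟨c, hc1, hc2, hc3⟩ := pvUpd_min t a hpw
    have hfold : (a :: t).foldl pvUpd none = some c := by
      simpa [pvUpd] using hc1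
    rw [hfold]
    have hperm := PySem.List.sorted2_perm (a :: t) (fun x : Int × Int × String => -x.1)
      (fun x : Int × Int × String => x.2.1) false
    have hsorted : (PySem.List.sorted2 (a :: t) (fun x : Int × Int × String => -x.1)
        (fun x => x.2.1)).Pairwise (fun x y => pvKey x ≤ pvKey y) := by
      rw [pv_sorted2_eq]
      exact pv_pairwise_foldl_insertBy pvKey (a :: t) [] List.Pairwise.nil
    rcases hs : PySem.List.sorted2 (a :: t) (fun x : Int × Int × String => -x.1)
        (fun x => x.2.1) with - | ⟨h, t'⟩
    · rw [hs] at hperm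
      exact absurd (hperm.symm.eq_nil) (by simp)
    · rw [hs] at hperm hsorted
      have hhmem : h ∈ a :: t := hperm.mem_iff.1 List.mem_cons_self
      have hhmin : ∀ y ∈ a :: t, pvKey h ≤ pvKey y := by
        intro y hy
        rcases List.mem_cons.1 (hperm.mem_iff.2 hy) with rfl | hy'
        · exact le_refl _
        · exact (List.pairwise_cons.1 hsorted).1 y hy'
      have : h = c := pv_min_unique (a :: t) hpw hhmem hc2 hhmin hc3
      simp [this, pvProj]
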